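-- pv_equiv track=rewrite | github.com/asusmarketingtool/FINAL-SRAPPER-PHI | campaign_extract_to_sheets.py | _choose_from_srcset
-- ===== SOURCE A (Python) =====
-- from typing import List, Dict, Optional, Set, Tuple
--
-- def _choose_from_srcset(srcset_value: str) -> Optional[str]:
--     parts = [p.strip() for p in (srcset_value or "").split(",") if p.strip()]
--     if not parts:
--         return None
--     preferred = None
--     for p in parts:
--         url = p.split()[0]
--         if ("dlcdnwebimgs.asus.com" in url or "/fwebp" in url) and p.endswith(" 1x"):
--             return url
--         if "dlcdnwebimgs.asus.com" in url or "/fwebp" in url: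
--             preferred = preferred or url
--     if preferred:
--         return preferred
--     for p in parts:
--         if p.endswith(" 1x"):
--             return p.split()[0]
--     return parts[0].split()[0]
-- ===== SOURCE B (Python) =====
-- from typing import Optional
--
-- def _choose_from_srcset(srcset_value: str) -> Optional[str]:
--     parts = [p.strip() for p in (srcset_value or "").split(",") if p.strip()]
--     if not parts:
--         return None
--
--     def url(p):
--         return p.split()[0]
--
--     def good(p):
--         u = url(p)
--         return "dlcdnwebimgs.asus.com" in u or "/fwebp" in u
--
--     def one_x(p):
--         return p.endswith(" 1x")
--
--     return (next((url(p) for p in parts if good(p) and one_x(p)), None)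
--             or next((url(p) for p in parts if good(p)), None)
--             or next((url(p) for p in parts if one_x(p)), None)
--             or url(parts[0]))
-- ===== Notes on version B (the rewrite author's own statement) =====
-- stated objective: simpler
-- what changed: Replaces A's early-returning loop with a mutable accumulator plus two fallback loops by four independent first-match scans (good-and-1x, good, 1x, first part) chained with Python truthiness after the empty guard.
import Mathlib
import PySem

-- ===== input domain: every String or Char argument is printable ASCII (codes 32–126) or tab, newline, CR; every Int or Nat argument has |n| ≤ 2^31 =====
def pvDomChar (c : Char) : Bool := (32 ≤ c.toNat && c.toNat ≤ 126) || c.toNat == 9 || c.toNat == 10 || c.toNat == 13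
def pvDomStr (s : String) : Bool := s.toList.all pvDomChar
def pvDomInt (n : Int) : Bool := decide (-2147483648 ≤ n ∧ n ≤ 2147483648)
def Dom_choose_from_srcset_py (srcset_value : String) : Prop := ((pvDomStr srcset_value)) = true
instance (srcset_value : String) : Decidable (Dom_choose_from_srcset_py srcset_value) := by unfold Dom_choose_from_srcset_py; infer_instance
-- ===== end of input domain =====

-- B replaces A's early-returning loop + 'preferred' accumulator + two fallback loops by four
-- independent first-match scans chained with Python 'or' (objective: simpler decomposition).

-- ===== PORT A =====
-- A's loop: early-returns the url on (good ∧ endswith " 1x"); otherwise accumulates 'preferred'.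
-- Python's 'preferred' is None-or-a-nonempty-url and all its uses are truthiness tests, so it is
-- ported as a String with "" encoding None ('preferred or url' = if pref = "" then url else pref).
def pvALoop : List String → String → Option String × String
  | [], pref => (none, pref)
  | p :: rest, pref =>
    -- p.split()[0]: every p in parts is stripped and nonempty, so p.split() is never empty
    -- and the .headD "" default is unreachable there.
    let url := (PySem.Str.split₀ p).headD ""
    if (PySem.Str.isIn "dlcdnwebimgs.asus.com" url || PySem.Str.isIn "/fwebp" url)
        && PySem.Str.endswith p " 1x" then
      (some url, pref)
    else
      pvALoop rest
        (if PySem.Str.isIn "dlcdnwebimgs.asus.com" url || PySem.Str.isIn "/fwebp" url then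
          (if pref = "" then url else pref) else pref)

-- A's second loop: first part ending " 1x"
def pvALoop2 : List String → Option String
  | [] => none
  | p :: rest =>
    if PySem.Str.endswith p " 1x" then some ((PySem.Str.split₀ p).headD "") else pvALoop2 rest

def choose_from_srcset_py (srcset_value : String) : Option String :=
  -- sep "," is nonempty, so split? never returns none; getD [] is unreachable
  let parts := (((PySem.Str.split? srcset_value ",").getD []).map PySem.Str.strip).filter
      (fun p => p ≠ "")
  if parts.isEmpty then none
  else
    match pvALoop parts "" with
    | (some url, _) => some url
    | (none, preferred) =>
      if preferred ≠ "" then some preferred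
      else
        match pvALoop2 parts with
        | some u => some u
        | none => some ((PySem.Str.split₀ (parts.headD "")).headD "")

-- ===== PORT B =====
def pvBUrl (p : String) : String := (PySem.Str.split₀ p).headD ""   -- p.split()[0]; see note above

def pvBGood (p : String) : Bool :=
  let u := pvBUrl p
  PySem.Str.isIn "dlcdnwebimgs.asus.com" u || PySem.Str.isIn "/fwebp" u

def pvBOneX (p : String) : Bool := PySem.Str.endswith p " 1x"

-- Python 'x or y' on Optional[str]: a None or empty-string left operand falls through
def pvPyOr (a : Option String) (b : Option String) : Option String :=
  match a with
  | some s => if s = "" then b else some s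
  | none => b

def choose_from_srcset_py_alt (srcset_value : String) : Option String :=
  let parts := (((PySem.Str.split? srcset_value ",").getD []).map PySem.Str.strip).filter
      (fun p => p ≠ "")
  if parts.isEmpty then none
  else
    pvPyOr ((parts.find? (fun p => pvBGood p && pvBOneX p)).map pvBUrl)
      (pvPyOr ((parts.find? pvBGood).map pvBUrl)
        (pvPyOr ((parts.find? pvBOneX).map pvBUrl)
          (some (pvBUrl (parts.headD "")))))

-- ===== PRECONDITION & SPEC =====
def Spec_choose_from_srcset_py (srcset_value : String) (out : Option String) : Prop := out = choose_from_srcset_py_alt srcset_value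
instance (srcset_value : String) (out : Option String) : Decidable (Spec_choose_from_srcset_py srcset_value out) := by unfold Spec_choose_from_srcset_py; infer_instance

-- ===== CLAIM (what is proved, stated in full; the proofs are below) =====
def Claim_equal_choose_from_srcset_py : Prop := ∀ (srcset_value : String), Dom_choose_from_srcset_py srcset_value → Spec_choose_from_srcset_py srcset_value (choose_from_srcset_py srcset_value)

-- ===== LEMMAS AND PROOFS =====

-- unfolding equations for A's loops, phrased through B's predicates (definitionally equal)
theorem pvALoop_cons (p : String) (rest : List String) (pref : String) :
    pvALoop (p :: rest) pref
      = if (pvBGood p && pvBOneX p) = true then (some (pvBUrl p), pref)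
        else pvALoop rest
          (if pvBGood p = true then (if pref = "" then pvBUrl p else pref) else pref) := rfl

theorem pvALoop2_cons (p : String) (rest : List String) :
    pvALoop2 (p :: rest) = if pvBOneX p = true then some (pvBUrl p) else pvALoop2 rest := rfl

theorem pv_good_url_ne (p : String) (h : pvBGood p = true) : pvBUrl p ≠ "" := by
  intro he
  rw [pvBGood, he] at h
  revert h; decide

-- A's first loop early return = first (good ∧ 1x) scan
theorem pvALoop_fst (ps : List String) (pref : String) :
    (pvALoop ps pref).1 = (ps.find? (fun p => pvBGood p && pvBOneX p)).map pvBUrl := by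
  induction ps generalizing pref with
  | nil => simp [pvALoop]
  | cons p rest ih =>
    rw [pvALoop_cons]
    by_cases hg : (pvBGood p && pvBOneX p) = true
    · rw [@List.find?_cons_of_pos _ (fun x => pvBGood x && pvBOneX x) p rest hg]; simp [hg]
    · rw [@List.find?_cons_of_neg _ (fun x => pvBGood x && pvBOneX x) p rest hg]; simp [hg, ih]

-- when no (good ∧ 1x) part exists, the loop's final 'preferred' is the first good url ("" = None)
theorem pvALoop_snd (ps : List String) (pref : String)
    (h : ps.find? (fun p => pvBGood p && pvBOneX p) = none) :
    (pvALoop ps pref).2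
      = if pref = "" then (((ps.find? pvBGood).map pvBUrl).getD "") else pref := by
  induction ps generalizing pref with
  | nil =>
    simp only [pvALoop, List.find?_nil, Option.map_none, Option.getD_none]
    split_ifs with hp <;> simp [hp]
  | cons p rest ih =>
    by_cases hc : (pvBGood p && pvBOneX p) = true
    · rw [@List.find?_cons_of_pos _ (fun x => pvBGood x && pvBOneX x) p rest hc] at h; exact absurd h (by simp)
    · rw [@List.find?_cons_of_neg _ (fun x => pvBGood x && pvBOneX x) p rest hc] at h
      rw [pvALoop_cons, if_neg hc, ih _ h]
      by_cases hg : pvBGood p = true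
      · rw [List.find?_cons_of_pos hg]
        have hne : pvBUrl p ≠ "" := pv_good_url_ne p hg
        by_cases hp : pref = "" <;> simp [hg, hp, hne]
      · rw [List.find?_cons_of_neg hg]
        simp [hg]

-- A's second loop = first " 1x" scan
theorem pvALoop2_eq (ps : List String) :
    pvALoop2 ps = (ps.find? pvBOneX).map pvBUrl := by
  induction ps with
  | nil => simp [pvALoop2]
  | cons p rest ih =>
    rw [pvALoop2_cons]
    by_cases h : pvBOneX p = true
    · rw [List.find?_cons_of_pos h]; simp [h]
    · rw [List.find?_cons_of_neg h]; simp [h, ih]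

-- split₀.go's accumulator is a pure prefix of the result
theorem pv_go_acc (cs cur : List Char) (acc : List (List Char)) :
    PySem.Chars.split₀.go cs cur acc = acc.reverse ++ PySem.Chars.split₀.go cs cur [] := by
  induction cs generalizing cur acc with
  | nil => simp only [PySem.Chars.split₀.go]; split <;> simp
  | cons c rest ih =>
    simp only [PySem.Chars.split₀.go]
    split
    · split
      · exact ih _ _
      · rw [ih _ (_ :: acc), ih _ [_]]; simp
    · exact ih _ _

-- with a nonempty current token, split₀.go returns a nonempty first token
theorem pv_go_head (cs : List Char) (cur : List Char) (h : cur ≠ []) :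
    ∃ t ts, PySem.Chars.split₀.go cs cur [] = t :: ts ∧ t ≠ [] := by
  induction cs generalizing cur with
  | nil =>
    refine ⟨cur.reverse, [], ?_, by simpa using h⟩
    simp [PySem.Chars.split₀.go, List.isEmpty_iff, h]
  | cons c rest ih =>
    simp only [PySem.Chars.split₀.go]
    split
    · rw [if_neg (by simpa [List.isEmpty_iff] using h)]
      rw [pv_go_acc]
      exact ⟨cur.reverse, PySem.Chars.split₀.go rest [] [], by simp, by simpa using h⟩
    · exact ih (c :: cur) (by simp)

-- a string starting with a non-space char has a nonempty first split() token
theorem pv_split₀_head (c : Char) (cs : List Char) (h : PySem.Chars.isspace c = false) :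
    ∃ t ts, PySem.Chars.split₀ (c :: cs) = t :: ts ∧ t ≠ [] := by
  simp only [PySem.Chars.split₀, PySem.Chars.split₀.go, h, Bool.false_eq_true, if_false]
  exact pv_go_head cs [c] (by simp)

-- a nonempty stripped string starts with a non-space char
theorem pv_strip_head (q : List Char) (h : PySem.Chars.strip q ≠ []) :
    ∃ c cs, PySem.Chars.strip q = c :: cs ∧ PySem.Chars.isspace c = false := by
  have hpre : PySem.Chars.rstrip (PySem.Chars.lstrip q) <+: PySem.Chars.lstrip q := by
    unfold PySem.Chars.rstrip
    have := List.reverse_prefix.mpr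
      (List.dropWhile_suffix (l := (PySem.Chars.lstrip q).reverse) PySem.Chars.isspace)
    simpa using this
  rw [PySem.Chars.strip] at h ⊢
  obtain ⟨c, cs, hcons⟩ := List.exists_cons_of_ne_nil h
  refine ⟨c, cs, hcons, ?_⟩
  obtain ⟨u, hu⟩ := hpre
  rw [hcons] at hu
  have hl : PySem.Chars.lstrip q = c :: (cs ++ u) := by rw [← hu]; simp
  have hh := List.head?_dropWhile_not PySem.Chars.isspace q
  rw [← PySem.Chars.lstrip, hl] at hh
  simpa using hh

-- every element of parts (a nonempty stripped piece) has a nonempty url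
theorem pv_parts_url_ne (l : List String) (p : String)
    (hp : p ∈ ((l.map PySem.Str.strip).filter (fun p => p ≠ ""))) : pvBUrl p ≠ "" := by
  rw [List.mem_filter] at hp
  obtain ⟨hpm, hpne⟩ := hp
  rw [List.mem_map] at hpm
  obtain ⟨q, _, hq⟩ := hpm
  have hpne' : p ≠ "" := by simpa using hpne
  have hlist : p.toList ≠ [] := fun hc => hpne' (String.toList_eq_nil_iff.mp hc)
  have hstrip : p.toList = PySem.Chars.strip q.toList := by
    rw [← hq]; simp [PySem.Str.strip]
  obtain ⟨c, cs, hcons, hcsp⟩ := pv_strip_head q.toList (by rw [← hstrip]; exact hlist)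
  obtain ⟨t, ts, hsplit, htne⟩ := pv_split₀_head c cs hcsp
  intro hurl
  rw [pvBUrl, PySem.Str.split₀, hstrip, hcons, hsplit] at hurl
  simp only [List.map_cons, List.headD_cons] at hurl
  exact htne (by simpa using congrArg String.toList hurl)

-- the core equivalence, for any parts list whose elements all have nonempty urls
theorem pv_core (parts : List String) (H : ∀ p ∈ parts, pvBUrl p ≠ "") :
    (if parts.isEmpty then none
     else
      match pvALoop parts "" with
      | (some url, _) => some url
      | (none, preferred) =>
        if preferred ≠ "" then some preferred
        else
          match pvALoop2 parts with
          | some u => some u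
          | none => some ((PySem.Str.split₀ (parts.headD "")).headD ""))
    = (if parts.isEmpty then none
       else
        pvPyOr ((parts.find? (fun p => pvBGood p && pvBOneX p)).map pvBUrl)
          (pvPyOr ((parts.find? pvBGood).map pvBUrl)
            (pvPyOr ((parts.find? pvBOneX).map pvBUrl)
              (some (pvBUrl (parts.headD "")))))) := by
  by_cases hemp : parts.isEmpty
  · simp [hemp]
  · simp only [hemp, Bool.false_eq_true, if_false]
    rcases hA : pvALoop parts "" with ⟨early, pref⟩
    rcases h1 : parts.find? (fun p => pvBGood p && pvBOneX p) with _ | p1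
    · -- no (good ∧ 1x) part
      have he : early = none := by
        have := pvALoop_fst parts ""
        rw [hA, h1] at this; simpa using this
      have hpref : pref = ((parts.find? pvBGood).map pvBUrl).getD "" := by
        have := pvALoop_snd parts "" h1
        rw [hA] at this; simpa using this
      subst he
      rcases h2 : parts.find? pvBGood with _ | p2
      · -- no good part: pref = ""
        rw [h2] at hpref; simp only [Option.map_none, Option.getD_none] at hpref
        subst hpref
        simp only [ne_eq, not_true_eq_false, if_false, pvPyOr, Option.map_none]
        rcases h3 : parts.find? pvBOneX with _ | p3
        · rw [pvALoop2_eq, h3]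
          simp [pvBUrl]
        · rw [pvALoop2_eq, h3]
          have hne : pvBUrl p3 ≠ "" := H p3 (List.mem_of_find?_eq_some h3)
          simp [hne]
      · -- a good part exists: pref = its url, nonempty
        rw [h2] at hpref; simp only [Option.map_some, Option.getD_some] at hpref
        have hg : pvBGood p2 = true := (List.find?_eq_some_iff_append.mp h2).1
        have hne : pvBUrl p2 ≠ "" := pv_good_url_ne p2 hg
        subst hpref
        simp [hne, pvPyOr]
    · -- early return on the first (good ∧ 1x) part
      have he : early = some (pvBUrl p1) := by
        have := pvALoop_fst parts ""
        rw [hA, h1] at this; simpa using this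
      subst he
      have hg : (pvBGood p1 && pvBOneX p1) = true := (List.find?_eq_some_iff_append.mp h1).1
      have hne : pvBUrl p1 ≠ "" := pv_good_url_ne p1 ((Bool.and_eq_true _ _).mp hg).1
      simp [pvPyOr, hne]

theorem choose_eq (s : String) :
    choose_from_srcset_py s = choose_from_srcset_py_alt s := by
  rw [choose_from_srcset_py, choose_from_srcset_py_alt]
  exact pv_core _ (fun p hp => pv_parts_url_ne ((PySem.Str.split? s ",").getD []) p hp)

-- ===== VERDICT (by name: the statement is the Claim_ definition above) =====
theorem choose_from_srcset_py_spec : Claim_equal_choose_from_srcset_py := by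
  intro s _
  unfold Spec_choose_from_srcset_py
  exact choose_eq s
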